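-- pv_equiv track=rewrite | github.com/Jakepps/CryptographicProtocols | LR5/task11.py | quadratic_residue_modulo
-- ===== SOURCE A (Python) =====
-- def legendre_symbol(a, p):
--     """
--     Вычисляет символ Лежандра a/p
--     """
--     ls = pow(a, (p - 1) // 2, p)
--     return ls if ls != p - 1 else -1
--
-- def quadratic_residue_modulo(d, m):
--     """
--     Решение квадратичного сравнения x^2 ≡ d (mod m)
--     """
--     solutions = []
--     if legendre_symbol(d, m) == -1:
--         return solutions  # нет решений
--     for x in range(m):
--         if (x*x - d) % m == 0:
--             solutions.append(x)
--     return solutions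
-- ===== SOURCE B (Python) =====
-- def quadratic_residue_modulo(d, m):
--     if pow(d, (m - 1) // 2, m) == m - 1:
--         return []
--     r = d % m
--     low = [x for x in range(m // 2 + 1) if x * x % m == r]
--     return low + [m - x for x in reversed(low) if 0 < x and 2 * x != m]
-- ===== Notes on version B (the rewrite author's own statement) =====
-- stated objective: faster
-- what changed: B scans only x in [0, m//2] (half the range, with a cheaper test x*x % m == r against a precomputed r) and reconstructs the upper roots as m - x by the symmetry x^2 = (m-x)^2 (mod m), appending them in reverse so the result stays ascending; A scans the full range(m).
import Mathlib
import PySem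

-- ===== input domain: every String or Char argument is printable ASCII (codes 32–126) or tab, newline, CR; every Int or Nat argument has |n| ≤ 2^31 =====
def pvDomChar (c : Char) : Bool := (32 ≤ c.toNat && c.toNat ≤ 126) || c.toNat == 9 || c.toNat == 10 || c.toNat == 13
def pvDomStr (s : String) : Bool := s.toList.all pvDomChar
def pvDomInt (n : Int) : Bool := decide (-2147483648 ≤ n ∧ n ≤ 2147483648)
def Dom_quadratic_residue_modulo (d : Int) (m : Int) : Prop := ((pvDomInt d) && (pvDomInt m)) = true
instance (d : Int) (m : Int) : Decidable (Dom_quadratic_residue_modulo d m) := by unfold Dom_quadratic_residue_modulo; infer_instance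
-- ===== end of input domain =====

-- B scans only half the range and mirrors the roots by the symmetry x^2 ≡ (m-x)^2 (mod m); objective: faster (constant factor).

-- ===== PORT A =====
-- Python's three-argument pow(b, e, m) ported as binary square-and-multiply (CPython computes
-- it this way; the naive b^e is not feasibly evaluable). Proved equal to the PySem primitive
-- PySem.Int.powMod for every modulus 0 < m in lemma pvPowMod_eq_powMod below.
def pvPowModAux : Nat → Int → Nat → Int → Int → Int
  | 0, _, _, _, acc => acc
  | fuel + 1, base, e, m, acc =>
    if e = 0 then acc
    else pvPowModAux fuel (PySem.Int.mod (base * base) m) (e / 2) m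
      (if e % 2 = 1 then PySem.Int.mod (acc * base) m else acc)

def pvPowMod (b : Int) (e : Nat) (m : Int) : Int :=
  pvPowModAux e (PySem.Int.mod b m) e m (PySem.Int.mod 1 m)

def legendre_symbol (a : Int) (p : Int) : Int :=
  let ls := pvPowMod a (PySem.Int.floordiv (p - 1) 2).toNat p
  if ls ≠ p - 1 then ls else -1

def quadratic_residue_modulo (d : Int) (m : Int) : List Int :=
  let solutions : List Int := []
  if legendre_symbol d m == -1 then solutions
  else
    (PySem.List.pyRange 0 m 1).foldl
      (fun acc x => if PySem.Int.mod (x * x - d) m == 0 then acc ++ [x] else acc) solutions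

-- ===== PORT B =====
def quadratic_residue_modulo_alt (d : Int) (m : Int) : List Int :=
  if pvPowMod d (PySem.Int.floordiv (m - 1) 2).toNat m == m - 1 then []
  else
    let r := PySem.Int.mod d m
    let low := (PySem.List.pyRange 0 (PySem.Int.floordiv m 2 + 1) 1).filter
      (fun x => PySem.Int.mod (x * x) m == r)
    low ++ (low.reverse.filter (fun x => decide (0 < x) && decide (2 * x ≠ m))).map (fun x => m - x)

-- ===== PRECONDITION & SPEC =====
-- Pre_ excludes exactly the inputs where pow raises ValueError: m = 0 (zero modulus), and
-- m < 0 with gcd(d, m) ≠ 1 (negative exponent, base not invertible).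
def Pre_quadratic_residue_modulo (d : Int) (m : Int) : Prop := 1 ≤ m ∨ (m < 0 ∧ Int.gcd d m = 1)
instance (d : Int) (m : Int) : Decidable (Pre_quadratic_residue_modulo d m) := by unfold Pre_quadratic_residue_modulo; infer_instance
def pvWitness_quadratic_residue_modulo : Int × Int := (2, 7)

def Spec_quadratic_residue_modulo (d : Int) (m : Int) (out : List Int) : Prop := out = quadratic_residue_modulo_alt d m
instance (d : Int) (m : Int) (out : List Int) : Decidable (Spec_quadratic_residue_modulo d m out) := by unfold Spec_quadratic_residue_modulo; infer_instance

-- ===== CLAIM (what is proved, stated in full; the proofs are below) =====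
def Claim_equal_quadratic_residue_modulo : Prop := ∀ (d : Int) (m : Int), Dom_quadratic_residue_modulo d m → Pre_quadratic_residue_modulo d m → Spec_quadratic_residue_modulo d m (quadratic_residue_modulo d m)

-- ===== LEMMAS AND PROOFS =====

lemma pv_pow_emod (a : Int) (b : Nat) (n : Int) : (a % n) ^ b % n = a ^ b % n := by
  induction b with
  | zero => simp
  | succ k ih =>
    rw [pow_succ, pow_succ, Int.mul_emod, ih, Int.emod_emod_of_dvd _ (dvd_refl n),
        ← Int.mul_emod]

lemma pvPowModAux_spec (m : Int) (hm : 0 < m) :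
    ∀ (fuel e : Nat) (base acc : Int), e ≤ fuel → acc % m = acc →
      pvPowModAux fuel base e m acc = acc * base ^ e % m := by
  intro fuel
  induction fuel with
  | zero =>
    intro e base acc he hacc
    have he0 : e = 0 := by omega
    simp [pvPowModAux, he0, hacc]
  | succ fuel ih =>
    intro e base acc he hacc
    rw [pvPowModAux]
    by_cases he0 : e = 0
    · simp [he0, hacc]
    · rw [if_neg he0]
      have hmod : ∀ a : Int, PySem.Int.mod a m = a % m := fun a =>
        PySem.Int.mod_eq_emod_of_pos hm
      have hacc' : (if e % 2 = 1 then PySem.Int.mod (acc * base) m else acc) % m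
          = (if e % 2 = 1 then PySem.Int.mod (acc * base) m else acc) := by
        by_cases hp : e % 2 = 1 <;> simp [hp, hmod, Int.emod_emod_of_dvd _ (dvd_refl m), hacc]
      rw [ih (e / 2) _ _ (by omega) hacc']
      have hk : e = 2 * (e / 2) + e % 2 := by omega
      by_cases hp : e % 2 = 1
      · rw [if_pos hp]
        simp only [hmod]
        rw [Int.mul_emod, pv_pow_emod, Int.emod_emod_of_dvd _ (dvd_refl m),
            ← Int.mul_emod]
        have he2 : e = 2 * (e / 2) + 1 := by omega
        conv_rhs => rw [he2]
        congr 1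
        ring
      · rw [if_neg hp]
        simp only [hmod]
        rw [Int.mul_emod, pv_pow_emod, ← Int.mul_emod]
        have he2 : e = 2 * (e / 2) := by omega
        conv_rhs => rw [he2]
        congr 1
        ring

lemma pvPowMod_eq_powMod (b : Int) (e : Nat) (m : Int) (hm : 0 < m) :
    pvPowMod b e m = PySem.Int.powMod b e m := by
  have hmod : ∀ a : Int, PySem.Int.mod a m = a % m := fun a =>
    PySem.Int.mod_eq_emod_of_pos hm
  unfold pvPowMod PySem.Int.powMod
  rw [hmod, hmod, hmod]
  rw [pvPowModAux_spec m hm e e _ _ (le_refl e)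
      (Int.emod_emod_of_dvd _ (dvd_refl m))]
  rw [Int.mul_emod, pv_pow_emod, Int.emod_emod_of_dvd _ (dvd_refl m),
      ← Int.mul_emod, one_mul]

-- map (m - .) of an ascending range is a reversed ascending range
lemma map_sub_pyRange (m a b : Int) :
    (PySem.List.pyRange a b 1).map (fun x => m - x)
      = (PySem.List.pyRange (m - b + 1) (m - a + 1) 1).reverse := by
  have h1 : (PySem.List.pyRange (m - b + 1) (m - a + 1) 1).reverse
      = PySem.List.pyRange (m - a) (m - b) (-1) := by
    rw [PySem.List.pyRange_neg_one_eq_reverse]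
  rw [h1, PySem.List.pyRange_neg_one, PySem.List.pyRange_one]
  have h2 : m - a - (m - b) = b - a := by ring
  rw [h2, List.map_map]
  apply List.map_congr_left
  intro k _
  show m - (a + (k : Int)) = m - a - (k : Int)
  ring

-- filter commutes with the involutive map (m - .)
lemma filter_map_sub (m : Int) (S : Int → Bool) (L : List Int) :
    (L.filter S).map (fun x => m - x)
      = (L.map (fun x => m - x)).filter (fun y => S (m - y)) := by
  induction L with
  | nil => simp
  | cons x xs ih =>
    have hx : m - (m - x) = x := by ring
    rw [List.map_cons, List.filter_cons, List.filter_cons, hx]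
    cases S x with
    | false => simpa using ih
    | true => simpa using ih

-- the two membership tests agree
lemma test_eq (d m : Int) (hm : 1 ≤ m) (x : Int) :
    (PySem.Int.mod (x * x - d) m == 0)
      = (PySem.Int.mod (x * x) m == PySem.Int.mod d m) := by
  have hm0 : (0:Int) < m := hm
  rw [PySem.Int.mod_eq_emod_of_pos hm0, PySem.Int.mod_eq_emod_of_pos hm0,
      PySem.Int.mod_eq_emod_of_pos hm0]
  rw [Bool.eq_iff_iff]
  simp only [beq_iff_eq]
  exact (Int.emod_eq_emod_iff_emod_sub_eq_zero).symm

-- the residue test is symmetric under x ↦ m - x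
lemma test_symm (d m y : Int) (hm : 1 ≤ m) :
    (PySem.Int.mod ((m - y) * (m - y)) m == PySem.Int.mod d m)
      = (PySem.Int.mod (y * y) m == PySem.Int.mod d m) := by
  have hm0 : (0:Int) < m := hm
  rw [PySem.Int.mod_eq_emod_of_pos hm0, PySem.Int.mod_eq_emod_of_pos hm0,
      PySem.Int.mod_eq_emod_of_pos hm0]
  rw [Bool.eq_iff_iff]
  simp only [beq_iff_eq]
  have h : (m - y) * (m - y) % m = y * y % m := by
    rw [Int.emod_eq_emod_iff_emod_sub_eq_zero]
    have : (m - y) * (m - y) - y * y = m * (m - 2 * y) := by ring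
    rw [this]
    exact Int.mul_emod_right m _
  rw [h]

-- the core list identity: the full scan equals the half scan plus its mirror
lemma half_scan (d m : Int) (hm : 1 ≤ m) :
    (PySem.List.pyRange 0 m 1).filter (fun x => PySem.Int.mod (x * x - d) m == 0)
      = (PySem.List.pyRange 0 (PySem.Int.floordiv m 2 + 1) 1).filter
          (fun x => PySem.Int.mod (x * x) m == PySem.Int.mod d m)
        ++ (((PySem.List.pyRange 0 (PySem.Int.floordiv m 2 + 1) 1).filter
              (fun x => PySem.Int.mod (x * x) m == PySem.Int.mod d m)).reverse.filter
            (fun x => decide (0 < x) && decide (2 * x ≠ m))).map (fun x => m - x) := by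
  have hm0 : (0:Int) < m := hm
  set h : Int := PySem.Int.floordiv m 2 with hh
  have hhe : h = m / 2 := by rw [hh, PySem.Int.floordiv_eq_ediv_of_pos (by omega)]
  have hb : 2 * h ≤ m ∧ m ≤ 2 * h + 1 ∧ 0 ≤ h ∧ h < m := by omega
  -- replace A's test by Q
  rw [List.filter_congr (fun x _ => test_eq d m hm x)]
  -- split the full range at h+1
  rw [PySem.List.pyRange_one_append 0 (h + 1) m (by omega) (by omega), List.filter_append]
  congr 1
  -- mirror half: push reverse/map inside
  rw [List.filter_reverse, List.filter_filter, List.map_reverse, filter_map_sub,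
      map_sub_pyRange]
  have hsimp : m - (h + 1) + 1 = m - h := by ring
  have hsimp2 : m - 0 + 1 = m + 1 := by ring
  rw [hsimp, hsimp2, List.filter_reverse, List.reverse_reverse]
  rw [PySem.List.pyRange_one_append (m - h) (h + 1) (m + 1) (by omega) (by omega),
      PySem.List.pyRange_one_append (h + 1) m (m + 1) (by omega) (by omega),
      List.filter_append, List.filter_append]
  have c1 : (PySem.List.pyRange (m - h) (h + 1)).filter
      (fun y => decide (0 < m - y) && decide (2 * (m - y) ≠ m)
        && (PySem.Int.mod ((m - y) * (m - y)) m == PySem.Int.mod d m)) = [] := by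
    rw [List.filter_eq_nil_iff]
    intro y hy
    rw [PySem.List.mem_pyRange_one] at hy
    have h2y : 2 * (m - y) = m := by omega
    simp [h2y]
  have c3 : (PySem.List.pyRange m (m + 1)).filter
      (fun y => decide (0 < m - y) && decide (2 * (m - y) ≠ m)
        && (PySem.Int.mod ((m - y) * (m - y)) m == PySem.Int.mod d m)) = [] := by
    rw [List.filter_eq_nil_iff]
    intro y hy
    rw [PySem.List.mem_pyRange_one] at hy
    simp
    intro h1
    exact absurd h1 (by omega)
  have c2 : (PySem.List.pyRange (h + 1) m).filter
      (fun y => decide (0 < m - y) && decide (2 * (m - y) ≠ m)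
        && (PySem.Int.mod ((m - y) * (m - y)) m == PySem.Int.mod d m))
      = (PySem.List.pyRange (h + 1) m).filter
        (fun x => PySem.Int.mod (x * x) m == PySem.Int.mod d m) := by
    apply List.filter_congr
    intro y hy
    rw [PySem.List.mem_pyRange_one] at hy
    rw [test_symm d m y hm]
    simp [show 2 * (m - y) ≠ m from by omega]
    intro _
    omega
  rw [c1, c2, c3]
  simp
  -- now both sides are filters of ranges; split the mirrored range

-- the two gates agree, and under a false gate the bodies agree
lemma qrm_eq (d m : Int) (hm : 1 ≤ m) :
    quadratic_residue_modulo d m = quadratic_residue_modulo_alt d m := by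
  have hm0 : (0:Int) < m := hm
  have hls : 0 ≤ pvPowMod d (PySem.Int.floordiv (m - 1) 2).toNat m := by
    rw [pvPowMod_eq_powMod _ _ _ hm0]
    exact PySem.Int.mod_nonneg _ hm0
  unfold quadratic_residue_modulo quadratic_residue_modulo_alt legendre_symbol
  set ls := pvPowMod d (PySem.Int.floordiv (m - 1) 2).toNat m with hlsdef
  by_cases hgate : ls = m - 1
  · simp [hgate]
  · have hA : ((if ls ≠ m - 1 then ls else -1) == (-1 : Int)) = false := by
      simp [hgate]
      omega
    have hB : (ls == m - 1) = false := by simp [hgate]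
    simp only [hA, hB, Bool.false_eq_true, if_false]
    rw [PySem.List.foldl_append_if_eq_filter]
    rw [List.nil_append]
    exact half_scan d m hm

-- for negative m both programs return []: the scanned ranges are empty
lemma qrm_eq_neg (d m : Int) (hm : m < 0) :
    quadratic_residue_modulo d m = quadratic_residue_modulo_alt d m := by
  have hA : quadratic_residue_modulo d m = [] := by
    unfold quadratic_residue_modulo legendre_symbol
    rw [PySem.List.pyRange_one_eq_nil (le_of_lt hm)]
    simp
  have hB : quadratic_residue_modulo_alt d m = [] := by
    unfold quadratic_residue_modulo_alt
    have hfd : PySem.Int.floordiv m 2 = m / 2 := PySem.Int.floordiv_eq_ediv_of_pos (by omega)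
    rw [hfd, PySem.List.pyRange_one_eq_nil (by omega : m / 2 + 1 ≤ 0)]
    simp
  rw [hA, hB]

-- ===== VERDICT (by name: the statement is the Claim_ definition above) =====
theorem quadratic_residue_modulo_spec : Claim_equal_quadratic_residue_modulo := by
  intro d m _ hm
  rcases hm with hm | ⟨hm, _⟩
  · exact qrm_eq d m hm
  · exact qrm_eq_neg d m hm
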